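-- pv_equiv track=rewrite | github.com/miliar/Code_Jam_Webscraper | solutions_python/Problem_201/422.py | solve
-- ===== SOURCE A (Python) =====
-- def solve(N, K):
--     if N == K:
--         return (0, 0)
--
--     depth = 0
--     low = high = N
--     while not 2 ** depth <= K < 2 ** (depth + 1):
--         depth += 1
--         low = (low - 1) // 2
--         high = high // 2
--     if low == high:
--         nlow = 2 ** depth
--     else:
--         nlow = ((high + 1) * 2 ** depth - N - 1) // (high - low)
--     nhigh = 2 ** depth - nlow
--     assert nlow * low + nhigh * high + 2 ** depth - 1 == N
--     i = K - 2 ** depth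
--     x = high if i < nhigh else low
--     if x <= 1:
--         return (0, 0)
--     return (x // 2, (x - 1) // 2)
-- ===== SOURCE B (Python) =====
-- def solve(N, K):
--     # closed form: person K is seated at depth d = bit_length(K)-1, where the
--     # N free stalls split into p = 2^d segments of sizes q and q+1 (r of them).
--     d = K.bit_length() - 1
--     p = 1 << d
--     q, r = divmod(N + 1 - p, p)
--     x = q + 1 if K - p < r else q
--     if x <= 1:
--         return (0, 0)
--     return (x // 2, (x - 1) // 2)
-- ===== Notes on version B (the rewrite author's own statement) =====
-- stated objective: simpler
-- what changed: B replaces A's depth-search while-loop and the low/high/nlow/nhigh case analysis with a loop-free closed form: depth d from K.bit_length(), then one divmod splits the N stalls into 2^d segments of sizes q and q+1, picking the K-th segment directly.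
-- outside the precondition, e.g. on solve(0, 0): A returns (0, 0), B raises ValueError
import Mathlib
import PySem

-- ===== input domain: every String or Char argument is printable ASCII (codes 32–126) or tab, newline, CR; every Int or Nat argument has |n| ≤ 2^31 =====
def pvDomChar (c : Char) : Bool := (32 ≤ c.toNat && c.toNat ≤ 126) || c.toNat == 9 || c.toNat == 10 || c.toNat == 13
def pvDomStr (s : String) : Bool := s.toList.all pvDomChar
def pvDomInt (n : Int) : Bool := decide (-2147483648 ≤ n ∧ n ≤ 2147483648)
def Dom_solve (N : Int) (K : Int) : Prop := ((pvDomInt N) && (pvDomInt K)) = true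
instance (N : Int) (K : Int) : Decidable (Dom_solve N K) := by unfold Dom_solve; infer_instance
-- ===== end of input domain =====

-- B replaces A's depth-search while-loop and low/high/nlow/nhigh case analysis by a
-- loop-free closed form (bit_length + one divmod).

-- ===== PORT A =====
-- the while loop of A; `depth` stays a Nat (it starts at 0 and is only incremented),
-- fuel 100 covers every K admitted by Dom_solve (the loop exits at depth = bit_length(K)-1
-- for K ≥ 1 ≤ 2^31; for K ≤ 0 the Python loops forever, excluded by Pre_solve).
def solveLoopA (K : Int) : Nat → Nat → Int → Int → Nat × Int × Int
  | 0, depth, low, high => (depth, low, high)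
  | fuel + 1, depth, low, high =>
    if (2:Int) ^ depth ≤ K ∧ K < 2 ^ (depth + 1) then (depth, low, high)
    else solveLoopA K fuel (depth + 1)
      (PySem.Int.floordiv (low - 1) 2) (PySem.Int.floordiv high 2)

def solve (N : Int) (K : Int) : Int × Int :=
  if N = K then (0, 0)
  else
    let t := solveLoopA K 100 0 N N
    let depth := t.1; let low := t.2.1; let high := t.2.2
    let p : Int := 2 ^ depth
    let nlow := if low = high then p
                else PySem.Int.floordiv ((high + 1) * p - N - 1) (high - low)
    let nhigh := p - nlow
    -- Python's `assert` holds on every input Pre_solve admits; it is not ported.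
    let i := K - p
    let x := if i < nhigh then high else low
    if x ≤ 1 then (0, 0)
    else (PySem.Int.floordiv x 2, PySem.Int.floordiv (x - 1) 2)

-- ===== PORT B =====
def solve_alt (N : Int) (K : Int) : Int × Int :=
  let d : Nat := PySem.Int.bitLength K - 1   -- K ≥ 1 on Pre_solve, so no Nat truncation
  let p : Int := 2 ^ d                       -- 1 << d
  let q := PySem.Int.floordiv (N + 1 - p) p
  let r := PySem.Int.mod (N + 1 - p) p
  let x := if K - p < r then q + 1 else q
  if x ≤ 1 then (0, 0)
  else (PySem.Int.floordiv x 2, PySem.Int.floordiv (x - 1) 2)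

-- ===== PRECONDITION & SPEC =====
-- Pre_solve excludes exactly K ≤ 0: there the Python A loops forever, except for the
-- accidental N == K shortcut (e.g. N = K = 0, returning (0, 0)), a corner on which B's
-- bit_length-based formula instead raises ValueError (1 << -1).
def Pre_solve (N : Int) (K : Int) : Prop := 1 ≤ K
instance (N : Int) (K : Int) : Decidable (Pre_solve N K) := by unfold Pre_solve; infer_instance
def pvWitness_solve : Int × Int := (4, 2)

def Spec_solve (N : Int) (K : Int) (out : Int × Int) : Prop := out = solve_alt N K
instance (N : Int) (K : Int) (out : Int × Int) : Decidable (Spec_solve N K out) := by unfold Spec_solve; infer_instance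

-- ===== CLAIM (what is proved, stated in full; the proofs are below) =====
def Claim_equal_solve : Prop := ∀ (N : Int) (K : Int), Dom_solve N K → Pre_solve N K → Spec_solve N K (solve N K)

-- ===== LEMMAS AND PROOFS =====

lemma pv_ediv_eq {a b q : Int} (r : Int) (h1 : 0 ≤ r) (h2 : r < b) (h : a = b * q + r) : a / b = q := by
  have := Int.add_mul_ediv_left r q (by omega : b ≠ 0)
  rw [h, add_comm, this, Int.ediv_eq_zero_of_lt h1 h2, zero_add]

lemma pv_bitLength_bounds (K : Int) (hK : 1 ≤ K) :
    1 ≤ PySem.Int.bitLength K ∧ (2:Int) ^ (PySem.Int.bitLength K - 1) ≤ K ∧ K < 2 ^ PySem.Int.bitLength K := by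
  have h0 : K ≠ 0 := by omega
  have hle := PySem.Int.two_pow_bitLength_le K h0
  have hlt := PySem.Int.lt_two_pow_bitLength K
  have habs : (K.natAbs : Int) = K := Int.natAbs_of_nonneg (by omega)
  have h1 : 1 ≤ K.natAbs := by omega
  have hb1 : 1 ≤ PySem.Int.bitLength K := by
    by_contra h
    have : PySem.Int.bitLength K = 0 := by omega
    rw [this] at hlt; simp at hlt; omega
  refine ⟨hb1, ?_, ?_⟩
  · calc ((2:Int) ^ (PySem.Int.bitLength K - 1)) = ((2 ^ (PySem.Int.bitLength K - 1) : Nat) : Int) := by push_cast; ring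
    _ ≤ (K.natAbs : Int) := by exact_mod_cast hle
    _ = K := habs
  · calc K = (K.natAbs : Int) := habs.symm
    _ < ((2 ^ PySem.Int.bitLength K : Nat) : Int) := by exact_mod_cast hlt
    _ = 2 ^ PySem.Int.bitLength K := by push_cast; ring
lemma pv_loopA_eq (K N : Int) (hK : 1 ≤ K) :
    ∀ (fuel depth : Nat) (low high : Int),
      low = (N + 1) / 2 ^ depth - 1 → high = N / 2 ^ depth →
      (2:Int) ^ depth ≤ K → K < 2 ^ (depth + fuel) →
      solveLoopA K fuel depth low high =
        (PySem.Int.bitLength K - 1,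
         (N + 1) / 2 ^ (PySem.Int.bitLength K - 1) - 1,
         N / 2 ^ (PySem.Int.bitLength K - 1)) := by
  intro fuel
  induction fuel with
  | zero => intro depth low high _ _ h1 h2; simp at h2; omega
  | succ fuel ih =>
    intro depth low high hl hh h1 h2
    rw [solveLoopA]
    by_cases hc : (2:Int) ^ depth ≤ K ∧ K < 2 ^ (depth + 1)
    · rw [if_pos hc]
      obtain ⟨hb1, hbl, hbh⟩ := pv_bitLength_bounds K hK
      have hdep : depth = PySem.Int.bitLength K - 1 := by
        by_contra hne
        rcases Nat.lt_or_ge depth (PySem.Int.bitLength K - 1) with h | h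
        · have : (2:Int) ^ (depth + 1) ≤ 2 ^ (PySem.Int.bitLength K - 1) :=
            pow_le_pow_right₀ (by norm_num) (by omega)
          omega
        · have : (2:Int) ^ (PySem.Int.bitLength K) ≤ 2 ^ depth :=
            pow_le_pow_right₀ (by norm_num) (by omega)
          omega
      subst hdep; rw [hl, hh]
    · rw [if_neg hc]
      have h3 : (2:Int) ^ (depth + 1) ≤ K := by
        rcases not_and_or.mp hc with h | h
        · omega
        · omega
      apply ih (depth + 1)
      · rw [hl]
        have hpos : (0:Int) < 2 ^ depth := by positivity
        rw [PySem.Int.floordiv_eq_ediv_of_pos (by norm_num)]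
        have : ((N + 1) / 2 ^ depth - 1 - 1) / 2 = ((N + 1) / 2 ^ depth) / 2 - 1 := by omega
        rw [this, Int.ediv_ediv_of_nonneg (by positivity), ← pow_succ]
      · rw [hh]
        rw [PySem.Int.floordiv_eq_ediv_of_pos (by norm_num)]
        rw [Int.ediv_ediv_of_nonneg (by positivity : (0:Int) ≤ 2 ^ depth), ← pow_succ]
      · exact h3
      · have : depth + 1 + fuel = depth + (fuel + 1) := by omega
        rw [this]; exact h2

theorem main_eq (N K : Int) (hD : K ≤ 2147483648) (hK : 1 ≤ K) :
    solve N K = solve_alt N K := by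
  obtain ⟨hb1, hbl, hbh⟩ := pv_bitLength_bounds K hK
  set d : Nat := PySem.Int.bitLength K - 1 with hd
  set p : Int := 2 ^ d with hp0
  have hp : 0 < p := by positivity
  have hpK : p ≤ K := hbl
  have hK2p : K < 2 * p := by
    have hbd : PySem.Int.bitLength K = d + 1 := by omega
    rw [hbd, pow_succ] at hbh; linarith
  set e : Int := (N + 1) / p with he0
  set tt : Int := (N + 1) % p with ht0
  have hNe : p * e + tt = N + 1 := by rw [he0, ht0, Int.mul_ediv_add_emod]
  have htt0 : 0 ≤ tt := Int.emod_nonneg _ (by omega)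
  have http : tt < p := Int.emod_lt_of_pos _ hp
  have hq : (N + 1 - p) / p = e - 1 := by
    have h1 : N + 1 - p = N + 1 + (-1) * p := by ring
    rw [h1, Int.add_mul_ediv_right _ _ (by omega : p ≠ 0)]; rw [he0]; ring
  have hr : (N + 1 - p) % p = tt := Int.sub_emod_right _ _
  -- B evaluates to the K-th segment size x = (if K - p < tt then e else e - 1), clamped
  have halt : solve_alt N K =
      (if (if K - p < tt then e else e - 1) ≤ 1 then ((0:Int), (0:Int))
       else (PySem.Int.floordiv (if K - p < tt then e else e - 1) 2,
             PySem.Int.floordiv ((if K - p < tt then e else e - 1) - 1) 2)) := by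
    simp only [solve_alt, ← hd, ← hp0,
      PySem.Int.floordiv_eq_ediv_of_pos hp, PySem.Int.mod_eq_emod_of_pos hp, hq, hr]
    have hqx : (if K - p < tt then e - 1 + 1 else e - 1) = (if K - p < tt then e else e - 1) := by
      split
      · ring
      · rfl
    rw [hqx]
  by_cases hNK : N = K
  · -- A returns (0,0) before its loop; B's K-th segment has size 1 there
    have hpN : p ≤ N := by omega
    have hN2p : N < 2 * p := by omega
    have he1 : 1 ≤ e := by
      have h1 : (1:Int) ≤ (N + 1) / p := (Int.le_ediv_iff_mul_le hp).mpr (by linarith)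
      rw [he0]; exact h1
    have hxB : (if K - p < tt then e else e - 1) = 1 := by
      by_cases h0 : tt = 0
      · have he2 : e = 2 := by
          rcases lt_trichotomy e 2 with h | h | h
          · exfalso
            have h1 : p * e ≤ p * 1 := mul_le_mul_of_nonneg_left (by linarith) hp.le
            linarith
          · exact h
          · exfalso
            have h1 : p * 3 ≤ p * e := mul_le_mul_of_nonneg_left (by linarith) hp.le
            linarith
        rw [if_neg (by omega), he2]; ring
      · have htt1 : 0 < tt := lt_of_le_of_ne htt0 (Ne.symm h0)
        have he' : e = 1 := by
          rcases lt_or_ge 1 e with h | h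
          · exfalso
            have h1 : p * 2 ≤ p * e := mul_le_mul_of_nonneg_left (by linarith) hp.le
            linarith
          · linarith
        rw [he'] at hNe
        rw [if_pos (by linarith), he']
    rw [halt, hxB, solve, if_pos hNK]
    norm_num
  · simp only [solve, if_neg hNK]
    rw [pv_loopA_eq K N hK 100 0 N N
      (by norm_num) (by norm_num) (by simpa using hK)
      (by have h1 : (2147483648:Int) < 2 ^ (0 + 100) := by norm_num
          linarith)]
    simp only [← hd, ← hp0, ← he0]
    by_cases h0 : tt = 0
    · -- p divides N+1: all 2^d segments have size e - 1 (low = high)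
      have hhigh : N / p = e - 1 := pv_ediv_eq (p - 1) (by omega) (by omega)
        (by linear_combination -hNe + h0)
      rw [hhigh]
      simp only [if_true, sub_self, ite_self]
      rw [halt, if_neg (by omega : ¬ K - p < tt)]
    · -- tt of the segments have size e, the rest size e - 1 (high = low + 1)
      have hhigh : N / p = e := pv_ediv_eq (tt - 1)
        (by linarith [lt_of_le_of_ne htt0 (Ne.symm h0)]) (by linarith)
        (by linear_combination -hNe)
      rw [hhigh]
      rw [if_neg (by omega : ¬ e - 1 = e)]
      have hdv : e - (e - 1) = 1 := by ring
      rw [hdv, PySem.Int.floordiv_eq_ediv_of_pos one_pos, Int.ediv_one]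
      have hnh : p - ((e + 1) * p - N - 1) = tt := by linear_combination -hNe
      rw [hnh, halt]

-- ===== VERDICT (by name: the statement is the Claim_ definition above) =====
theorem solve_spec : Claim_equal_solve := by
  intro N K hD hP
  unfold Spec_solve
  have hD2 : K ≤ 2147483648 := by
    simp only [Dom_solve, pvDomInt, Bool.and_eq_true, decide_eq_true_eq] at hD
    omega
  exact main_eq N K hD2 hP
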